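-- pv_equiv track=rewrite | github.com/DNPoY/Abad-EL-RAHMAN-main | fix_encoding_and_syntax.py | fix_newlines_in_quotes
-- ===== SOURCE A (Python) =====
-- def fix_newlines_in_quotes(text):
--     new_text = ""
--     in_quote = False
--     for char in text:
--         if char == '"':
--             in_quote = not in_quote
--
--         if in_quote and char == '\n':
--             new_text += "\\n"
--         elif in_quote and char == '\r':
--             pass # ignore CR inside quotes
--         else:
--             new_text += char
--     return new_text
-- ===== SOURCE B (Python) =====
-- def fix_newlines_in_quotes(text):
--     segs = text.split('"')
--     out = []
--     for i, seg in enumerate(segs):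
--         out.append(seg if i % 2 == 0 else seg.replace('\n', '\\n').replace('\r', ''))
--     return '"'.join(out)
-- ===== Notes on version B (the rewrite author's own statement) =====
-- stated objective: idiomatic
-- what changed: Replaced the per-character quote-toggle state machine with a split on the double-quote character, applying the two str.replace calls to the odd-indexed (inside-quote) segments and joining the segments back.
import Mathlib
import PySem

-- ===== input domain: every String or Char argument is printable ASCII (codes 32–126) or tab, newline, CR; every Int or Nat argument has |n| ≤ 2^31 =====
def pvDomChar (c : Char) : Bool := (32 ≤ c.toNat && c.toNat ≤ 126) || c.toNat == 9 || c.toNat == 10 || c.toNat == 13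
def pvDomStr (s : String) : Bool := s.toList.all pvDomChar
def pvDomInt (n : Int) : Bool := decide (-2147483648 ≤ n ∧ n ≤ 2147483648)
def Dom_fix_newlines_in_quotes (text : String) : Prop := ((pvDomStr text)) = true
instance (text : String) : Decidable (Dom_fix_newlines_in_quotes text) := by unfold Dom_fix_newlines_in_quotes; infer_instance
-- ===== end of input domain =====

-- B replaces A's per-character quote-toggle state machine by split-on-'"' / escape the
-- odd-indexed (inside-quote) segments / join; same return value, different decomposition.

-- ===== PORT A =====
-- A's loop: accumulator new_text (here a List Char built left-to-right) and the in_quote flag.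
def fixA_go : List Char → List Char → Bool → List Char
  | [], acc, _ => acc
  | c :: cs, acc, inq =>
    let inq' := if c = '"' then !inq else inq
    if inq' && c = '\n' then fixA_go cs (acc ++ ['\\', 'n']) inq'
    else if inq' && c = '\r' then fixA_go cs acc inq'
    else fixA_go cs (acc ++ [c]) inq'

def fix_newlines_in_quotes (text : String) : String :=
  String.ofList (fixA_go text.toList [] false)

-- ===== PORT B =====
-- hand port of text.split('"') (single-character separator)
def splitQ : List Char → List (List Char)
  | [] => [[]]
  | c :: cs =>
    if c = '"' then [] :: splitQ cs
    else
      match splitQ cs with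
      | s :: ss => (c :: s) :: ss
      | [] => [[c]]

-- seg.replace('\n','\\n').replace('\r','')
def escSeg (s : List Char) : List Char :=
  (s.flatMap (fun c => if c = '\n' then ['\\', 'n'] else [c])).filter (· ≠ '\r')

-- hand port of '"'.join(out)
def joinQ : List (List Char) → List Char
  | [] => []
  | [s] => s
  | s :: rest => s ++ '"' :: joinQ rest

def fix_newlines_in_quotes_alt (text : String) : String :=
  String.ofList (joinQ (((splitQ text.toList).zipIdx).map
    (fun p => if p.2 % 2 == 0 then p.1 else escSeg p.1)))

-- ===== PRECONDITION & SPEC =====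
def Spec_fix_newlines_in_quotes (text : String) (out : String) : Prop := out = fix_newlines_in_quotes_alt text
instance (text : String) (out : String) : Decidable (Spec_fix_newlines_in_quotes text out) := by unfold Spec_fix_newlines_in_quotes; infer_instance

-- ===== CLAIM (what is proved, stated in full; the proofs are below) =====
def Claim_equal_fix_newlines_in_quotes : Prop := ∀ (text : String), Dom_fix_newlines_in_quotes text → Spec_fix_newlines_in_quotes text (fix_newlines_in_quotes text)

-- ===== LEMMAS AND PROOFS =====

-- alternating processor: the common shape both sides reduce to
def procList : Bool → List (List Char) → List Char
  | _, [] => []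
  | inq, [s] => if inq then escSeg s else s
  | inq, s :: rest => (if inq then escSeg s else s) ++ '"' :: procList (!inq) rest

theorem splitQ_ne_nil (cs : List Char) : splitQ cs ≠ [] := by
  cases cs with
  | nil => simp [splitQ]
  | cons c cs =>
    simp only [splitQ]
    split
    · simp
    · cases h : splitQ cs <;> simp

theorem escSeg_nil : escSeg [] = [] := by simp [escSeg]

theorem escSeg_cons (c : Char) (s : List Char) :
    escSeg (c :: s) =
      (if c = '\n' then ['\\', 'n'] else if c = '\r' then [] else [c]) ++ escSeg s := by
  by_cases h : c = '\n'
  · subst h; simp [escSeg]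
  · by_cases h2 : c = '\r'
    · subst h2; simp [escSeg, h]
    · simp [escSeg, h, h2]

theorem procList_cons (inq : Bool) (s : List Char) (t : List Char) (ss : List (List Char)) :
    procList inq (s :: t :: ss) = (if inq then escSeg s else s) ++ '"' :: procList (!inq) (t :: ss) := by
  rfl

theorem procList_cons_ne (inq : Bool) (s : List Char) (ss : List (List Char)) (h : ss ≠ []) :
    procList inq (s :: ss) = (if inq then escSeg s else s) ++ '"' :: procList (!inq) ss := by
  cases ss with
  | nil => exact absurd rfl h
  | cons t ss => exact procList_cons inq s t ss

-- A's machine equals procList over the split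
theorem fixA_go_eq_procList (cs : List Char) :
    ∀ (acc : List Char) (inq : Bool), fixA_go cs acc inq = acc ++ procList inq (splitQ cs) := by
  induction cs with
  | nil =>
    intro acc inq
    cases inq <;> simp [fixA_go, splitQ, procList, escSeg_nil]
  | cons c cs ih =>
    intro acc inq
    by_cases hq : c = '"'
    · subst hq
      have hne := splitQ_ne_nil cs
      have hsp : splitQ ('\"' :: cs) = [] :: splitQ cs := by simp [splitQ]
      rw [hsp, procList_cons_ne inq [] (splitQ cs) hne]
      cases inq <;>
        simp [fixA_go, ih, escSeg_nil, List.append_assoc]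
    · -- c ≠ '"' : splitQ (c :: cs) = (c :: s) :: ss
      obtain ⟨s, ss, hs⟩ : ∃ s ss, splitQ cs = s :: ss := by
        cases h : splitQ cs with
        | nil => exact absurd h (splitQ_ne_nil cs)
        | cons s ss => exact ⟨s, ss, rfl⟩
      have hsplit : splitQ (c :: cs) = (c :: s) :: ss := by
        simp [splitQ, hq, hs]
      rw [hsplit]
      cases inq with
      | false =>
        have hgo : fixA_go (c :: cs) acc false = fixA_go cs (acc ++ [c]) false := by
          simp [fixA_go, hq]
        rw [hgo, ih, hs]
        cases ss with
        | nil => simp [procList]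
        | cons t ss => rw [procList_cons, procList_cons]; simp
      | true =>
        have hrec : fixA_go (c :: cs) acc true =
            fixA_go cs (acc ++ (if c = '\n' then ['\\', 'n'] else if c = '\r' then [] else [c])) true := by
          by_cases h1 : c = '\n'
          · subst h1; simp [fixA_go, hq]
          · by_cases h2 : c = '\r'
            · subst h2; simp [fixA_go, hq, h1]
            · simp [fixA_go, hq, h1, h2]
        rw [hrec, ih, hs]
        cases ss with
        | nil => simp [procList, escSeg_cons, List.append_assoc]
        | cons t ss =>
          rw [procList_cons, procList_cons]
          simp [escSeg_cons, List.append_assoc]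

-- B's enumerate-parity map + join equals procList
theorem joinQ_map_zipIdx (ss : List (List Char)) :
    ∀ (k : Nat),
      joinQ ((ss.zipIdx k).map (fun p => if p.2 % 2 == 0 then p.1 else escSeg p.1)) =
        procList (k % 2 == 1) ss := by
  induction ss with
  | nil => intro k; simp [joinQ, procList]
  | cons s ss ih =>
    intro k
    cases ss with
    | nil =>
      rcases Nat.mod_two_eq_zero_or_one k with h | h <;>
        simp [List.zipIdx, joinQ, procList, h]
    | cons t ss =>
      have hmap : ((s :: t :: ss).zipIdx k).map (fun p => if p.2 % 2 == 0 then p.1 else escSeg p.1) =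
          (if k % 2 == 0 then s else escSeg s) ::
            ((t :: ss).zipIdx (k + 1)).map (fun p => if p.2 % 2 == 0 then p.1 else escSeg p.1) := by
        simp [List.zipIdx]
      rw [hmap]
      have hjoin : ∀ (a : List Char) (l : List (List Char)), l ≠ [] →
          joinQ (a :: l) = a ++ '"' :: joinQ l := by
        intro a l hl
        cases l with
        | nil => exact absurd rfl hl
        | cons b l => rfl
      rw [hjoin _ _ (by simp)]
      rw [ih (k + 1), procList_cons]
      have hpar : ((k + 1) % 2 == 1) = !(k % 2 == 1) := by
        rcases Nat.mod_two_eq_zero_or_one k with h | h <;> simp [Nat.add_mod, h]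
      rw [hpar]
      rcases Nat.mod_two_eq_zero_or_one k with h | h <;> simp [h]

-- ===== VERDICT (by name: the statement is the Claim_ definition above) =====
theorem fix_newlines_in_quotes_spec : Claim_equal_fix_newlines_in_quotes := by
  intro text _
  show _ = _
  unfold fix_newlines_in_quotes fix_newlines_in_quotes_alt
  rw [fixA_go_eq_procList, joinQ_map_zipIdx (splitQ text.toList) 0]
  simp
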